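-- pv_equiv track=rewrite | github.com/Jw705/Algorithm | 프로그래머스/1/135808. 과일 장수/과일 장수.py | solution
-- ===== SOURCE A (Python) =====
-- def solution(k, m, score):
--     score.sort()
--     box=[]
--     answer = 0
--     for i in range(len(score)%m,len(score)):
--         box.append(score[i])
--         if len(box)==m:
--             answer+=box[0]*m
--             box=[]
--     return answer
-- ===== SOURCE B (Python) =====
-- def solution(k, m, score):
--     # A sorts `score` in place; B does the same, so the side effect matches too.
--     score.sort()
--     r = len(score) % m
--     return m * sum(score[i] for i in range(r, len(score), m))
-- ===== Notes on version B (the rewrite author's own statement) =====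
-- stated objective: simpler
-- what changed: Replaces the box-accumulator loop with a direct strided sum: after sorting, the answer is m times the sum of the elements at positions len%m, len%m+m, len%m+2m, ... (each box's minimum is the first element of its chunk), computed in one comprehension with no intermediate box list.
import Mathlib
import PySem

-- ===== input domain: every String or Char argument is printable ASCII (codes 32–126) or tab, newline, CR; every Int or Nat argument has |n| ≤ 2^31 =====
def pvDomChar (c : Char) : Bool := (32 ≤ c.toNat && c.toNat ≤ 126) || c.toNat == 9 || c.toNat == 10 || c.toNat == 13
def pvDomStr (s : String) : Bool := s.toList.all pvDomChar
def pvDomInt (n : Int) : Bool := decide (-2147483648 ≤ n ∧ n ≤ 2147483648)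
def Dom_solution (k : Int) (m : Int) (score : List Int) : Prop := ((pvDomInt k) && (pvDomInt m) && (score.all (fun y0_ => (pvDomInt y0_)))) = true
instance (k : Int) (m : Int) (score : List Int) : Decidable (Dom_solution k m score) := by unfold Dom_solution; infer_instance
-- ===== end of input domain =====

-- B replaces A's box-accumulator loop by a direct strided sum (m times the sum of every
-- m-th element of the sorted list, starting at len%m); same O(n log n) cost, simpler code.
-- Both A and B sort `score` in place (same side effect); the theorems are about the return value.

-- ===== PORT A =====
-- loop body of A: box.append(score[i]); if len(box)==m: answer += box[0]*m; box=[]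
def stepA (g : Int → Int) (m : Int) (st : List Int × Int) (i : Int) : List Int × Int :=
  let box := st.1 ++ [g i]
  if (box.length : Int) = m then (([] : List Int), st.2 + PySem.List.pyGetD box 0 0 * m)
  else (box, st.2)

def solution (k : Int) (m : Int) (score : List Int) : Int :=
  let s := PySem.List.sorted score (fun x => x)
  let st := (PySem.List.pyRange (PySem.Int.mod (s.length : Int) m) (s.length : Int) 1).foldl
      (stepA (fun i => PySem.List.pyGetD s i 0) m) (([] : List Int), (0 : Int))
  st.2

-- ===== PORT B =====
def solution_alt (k : Int) (m : Int) (score : List Int) : Int :=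
  let s := PySem.List.sorted score (fun x => x)
  let r := PySem.Int.mod (s.length : Int) m
  m * (PySem.List.pyRange r (s.length : Int) m).foldl
      (fun acc i => acc + PySem.List.pyGetD s i 0) 0

-- ===== PRECONDITION & SPEC =====
-- Pre_ excludes exactly the inputs where the Python A raises: m = 0 (ZeroDivisionError at len%m)
-- and m < 0 with len%m < -len (IndexError at score[len%m]).
def Pre_solution (k : Int) (m : Int) (score : List Int) : Prop :=
  m ≠ 0 ∧ (m < 0 → -(score.length : Int) ≤ PySem.Int.mod (score.length : Int) m)
instance (k : Int) (m : Int) (score : List Int) : Decidable (Pre_solution k m score) := by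
  unfold Pre_solution; infer_instance

def pvWitness_solution : Int × Int × List Int := (4, 3, [4, 1, 2, 4, 2, 1, 3])

def Spec_solution (k : Int) (m : Int) (score : List Int) (out : Int) : Prop := out = solution_alt k m score
instance (k : Int) (m : Int) (score : List Int) (out : Int) : Decidable (Spec_solution k m score out) := by unfold Spec_solution; infer_instance

-- ===== CLAIM (what is proved, stated in full; the proofs are below) =====
def Claim_equal_solution : Prop := ∀ (k : Int) (m : Int) (score : List Int), Dom_solution k m score → Pre_solution k m score → Spec_solution k m score (solution k m score)

-- ===== LEMMAS AND PROOFS =====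

-- sum of g at a, a+m, …, a+m*(t-1)
def strideSum (g : Int → Int) (m a : Int) : Nat → Int
  | 0 => 0
  | (t+1) => g a + strideSum g m (a + m) t

-- negative m: the condition len(box)==m never fires, answer stays put
theorem negA (g : Int → Int) (m : Int) (hm : m < 0) :
    ∀ (l : List Int) (box : List Int) (ans : Int),
      (l.foldl (stepA g m) (box, ans)).2 = ans := by
  intro l
  induction l with
  | nil => intro box ans; rfl
  | cons i l ih =>
    intro box ans
    have hne : ((box ++ [g i]).length : Int) ≠ m := by
      simp; omega
    simp only [List.foldl_cons, stepA, if_neg hne]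
    exact ih _ _

-- filling the box: once nonempty with head h, after the remaining j steps the box empties
-- and h*m is added
theorem fillA (g : Int → Int) (m : Int) :
    ∀ (j : Nat) (a h : Int) (rest : List Int) (ans : Int), 1 ≤ j →
      (((h :: rest).length : Int) + j = m) →
      ((PySem.List.pyRange a (a + (j : Int)) 1).foldl (stepA g m) (h :: rest, ans))
        = (([] : List Int), ans + h * m) := by
  intro j
  induction j with
  | zero => intro a h rest ans hj; omega
  | succ j ih =>
    intro a h rest ans hj hlen
    rcases Nat.eq_zero_or_pos j with hj0 | hjpos
    · subst hj0
      have h1 : PySem.List.pyRange a (a + (1 : Int)) 1 = [a] := by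
        simpa using PySem.List.pyRange_one_singleton a
      rw [show ((0 : Nat) + 1 : Nat) = 1 from rfl] at *
      simp only [Nat.cast_one] at h1 ⊢
      rw [h1]
      have hfire : (((h :: rest) ++ [g a]).length : Int) = m := by
        simp at hlen ⊢; omega
      simp only [List.foldl_cons, List.foldl_nil, stepA, if_pos hfire]
      simp [PySem.List.pyGetD_zero_cons]
    · have hcons : PySem.List.pyRange a (a + ((j + 1 : Nat) : Int)) 1
          = a :: PySem.List.pyRange (a + 1) ((a + 1) + (j : Int)) 1 := by
        rw [PySem.List.pyRange_one_cons (by push_cast; omega)]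
        congr 1
        push_cast; ring_nf
      rw [hcons]
      have hnof : (((h :: rest) ++ [g a]).length : Int) ≠ m := by
        simp at hlen ⊢; omega
      simp only [List.foldl_cons, stepA, if_neg hnof]
      have := ih (a + 1) h (rest ++ [g a]) ans hjpos (by simp at hlen ⊢; omega)
      simpa using this
-- one full chunk of m elements starting from an empty box adds g a * m
theorem chunkA (g : Int → Int) (m : Int) (hm : 0 < m) (a ans : Int) :
    (PySem.List.pyRange a (a + m) 1).foldl (stepA g m) (([] : List Int), ans)
      = (([] : List Int), ans + g a * m) := by
  rcases eq_or_lt_of_le (by omega : (1 : Int) ≤ m) with h1 | h2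
  · -- m = 1
    have h1' : m = 1 := h1.symm
    subst h1'
    rw [PySem.List.pyRange_one_singleton a]
    have hfire : ((([] : List Int) ++ [g a]).length : Int) = 1 := by simp
    simp only [List.foldl_cons, List.foldl_nil, stepA, if_pos hfire]
    simp [PySem.List.pyGetD_zero_cons]
  · -- m ≥ 2: first step fills box with [g a], then fillA
    have hcons : PySem.List.pyRange a (a + m) 1
        = a :: PySem.List.pyRange (a + 1) ((a + 1) + ((m - 1).toNat : Int)) 1 := by
      have harg : (a + 1) + ((m - 1).toNat : Int) = a + m := by omega
      rw [harg, PySem.List.pyRange_one_cons (by omega)]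
    rw [hcons]
    have hnof : ((([] : List Int) ++ [g a]).length : Int) ≠ m := by simp; omega
    simp only [List.foldl_cons, stepA, if_neg hnof]
    have := fillA g m (m - 1).toNat (a + 1) (g a) [] ans (by omega) (by simp; omega)
    simpa using this

-- A's whole loop over t chunks
theorem mainA (g : Int → Int) (m : Int) (hm : 0 < m) :
    ∀ (t : Nat) (a ans : Int),
      (PySem.List.pyRange a (a + m * (t : Int)) 1).foldl (stepA g m) (([] : List Int), ans)
        = (([] : List Int), ans + m * strideSum g m a t) := by
  intro t
  induction t with
  | zero =>
    intro a ans
    rw [show a + m * ((0 : Nat) : Int) = a by push_cast; ring]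
    rw [PySem.List.pyRange_one_eq_nil (le_refl a)]
    simp [strideSum]
  | succ t ih =>
    intro a ans
    have hsplit : PySem.List.pyRange a (a + m * ((t + 1 : Nat) : Int)) 1
        = PySem.List.pyRange a (a + m) 1 ++ PySem.List.pyRange (a + m) (a + m * ((t + 1 : Nat) : Int)) 1 := by
      apply PySem.List.pyRange_one_append
      · omega
      · push_cast; nlinarith [Int.natCast_nonneg t]
    rw [hsplit, List.foldl_append, chunkA g m hm a ans]
    have harg : a + m * ((t + 1 : Nat) : Int) = (a + m) + m * (t : Int) := by push_cast; ring
    rw [harg, ih (a + m) (ans + g a * m)]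
    simp [strideSum]; ring

-- range with positive step m over t strides, as a map
theorem rangeStride (m : Int) (hm : 0 < m) (t : Nat) (a : Int) :
    PySem.List.pyRange a (a + m * (t : Int)) m
      = (List.range t).map (fun k : Nat => a + m * (k : Int)) := by
  rw [PySem.List.pyRange_of_pos _ _ hm]
  have hc : (if a < a + m * (t : Int) then ((a + m * (t : Int) - a + m - 1) / m).toNat else 0) = t := by
    rcases Nat.eq_zero_or_pos t with h0 | hpos
    · subst h0
      rw [if_neg (by simp)]
    · have hlt : a < a + m * (t : Int) := by nlinarith [Int.natCast_pos.mpr hpos]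
      rw [if_pos hlt]
      have harg : a + m * (t : Int) - a + m - 1 = (m - 1) + m * (t : Int) := by ring
      rw [harg, Int.add_mul_ediv_left _ _ (by omega : m ≠ 0),
          Int.ediv_eq_zero_of_lt (by omega) (by omega)]
      simp
  rw [hc]

-- the strided map-sum equals strideSum
theorem sumStride (g : Int → Int) (m : Int) :
    ∀ (t : Nat) (a : Int),
      ((List.range t).map (fun k : Nat => g (a + m * (k : Int)))).sum = strideSum g m a t := by
  intro t
  induction t with
  | zero => intro a; simp [strideSum]
  | succ t ih =>
    intro a
    rw [List.range_succ_eq_map]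
    simp only [List.map_cons, List.map_map, List.sum_cons]
    have hstep : ((List.range t).map ((fun k : Nat => g (a + m * (k : Int))) ∘ Nat.succ))
        = (List.range t).map (fun k : Nat => g ((a + m) + m * (k : Int))) := by
      apply List.map_congr_left
      intro k _
      simp only [Function.comp]
      congr 1
      push_cast
      ring
    rw [hstep, ih (a + m)]
    simp [strideSum]

-- B's strided fold equals strideSum
theorem strideFold (g : Int → Int) (m : Int) (hm : 0 < m) (t : Nat) (a : Int) :
    (PySem.List.pyRange a (a + m * (t : Int)) m).foldl (fun acc i => acc + g i) 0
      = strideSum g m a t := by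
  rw [rangeStride m hm, List.foldl_map]
  rw [PySem.List.foldl_add _ (fun k : Nat => g (a + m * (k : Int))) 0]
  rw [sumStride g m t a]
  ring

theorem fmodNonpos (n m : Int) (h : m < 0) : n.fmod m ≤ 0 := by
  rw [Int.fmod_eq_emod]
  have h1 : 0 ≤ n % m := Int.emod_nonneg n (by omega)
  have h2 : n % m < -m := by
    have := Int.emod_lt n (b := m) (by omega)
    omega
  split_ifs with hc
  · rcases hc with hc | hc
    · omega
    · have := Int.emod_eq_zero_of_dvd hc
      omega
  · omega

-- ===== VERDICT (by name: the statement is the Claim_ definition above) =====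
theorem solution_spec : Claim_equal_solution := by
  intro k m score _ hpre
  simp only [Spec_solution, solution, solution_alt]
  obtain ⟨hm0, hneg⟩ := hpre
  set s := PySem.List.sorted score (fun x => x) with hs
  set n : Int := (s.length : Int) with hn
  set r : Int := PySem.Int.mod n m with hr
  have hn0 : 0 ≤ n := by positivity
  rcases lt_trichotomy m 0 with hmneg | hmz | hmpos
  · -- m < 0 : A's condition never fires, B's range is empty
    have hr0 : r ≤ 0 := by
      rw [hr]
      exact fmodNonpos n m hmneg
    rw [negA _ m hmneg]
    have hempty : PySem.List.pyRange r n m = [] := by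
      unfold PySem.List.pyRange
      rw [if_neg hm0, if_neg (by omega : ¬ 0 < m), if_neg (by omega : ¬ n < r)]
      simp
    rw [hempty]
    simp
  · exact absurd hmz hm0
  · -- m > 0
    have hfd : 0 ≤ n.fdiv m := Int.fdiv_nonneg hn0 (by omega)
    set t : Nat := (n.fdiv m).toNat with ht
    have hrn : n = r + m * (t : Int) := by
      have h1 : n.fmod m + m * n.fdiv m = n := Int.fmod_add_mul_fdiv n m
      have h2 : ((n.fdiv m).toNat : Int) = n.fdiv m := Int.toNat_of_nonneg hfd
      rw [ht, h2]
      have hr' : r = n.fmod m := hr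
      rw [hr']
      linarith
    rw [hrn, mainA _ m hmpos t r 0, strideFold _ m hmpos t r]
    simp
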